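-- pv_equiv track=rewrite | github.com/the9kim/python-algorithm-interview | Algorithm/kakao/t20/P2_1_Bracket_Transformation.py | split_bracket
-- ===== SOURCE A (Python) =====
-- def split_bracket(p: str) -> int:
--     open = 0
--     close = 0
--
--     for s in p:
--         if s == '(':
--             open += 1
--         else:
--             close += 1
--
--         if open == close:
--             return open + close
-- ===== SOURCE B (Python) =====
-- def split_bracket(p: str) -> int:
--     # Brute-force prefix testing: a balanced prefix must have even length 2*k
--     # with exactly k '(' characters; test each candidate length from scratch.
--     for k in range(1, len(p) // 2 + 1):
--         if p[:2 * k].count('(') == k: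
--             return 2 * k
-- ===== Notes on version B (the rewrite author's own statement) =====
-- stated objective: alternative
-- what changed: B drops A's running open/close counters entirely and instead brute-force tests each candidate even prefix length 2k from scratch, recounting '(' in the slice p[:2k] and returning the first length whose count is exactly k.
-- outside the precondition, e.g. on split_bracket('('): A returns None, B returns None
import Mathlib
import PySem

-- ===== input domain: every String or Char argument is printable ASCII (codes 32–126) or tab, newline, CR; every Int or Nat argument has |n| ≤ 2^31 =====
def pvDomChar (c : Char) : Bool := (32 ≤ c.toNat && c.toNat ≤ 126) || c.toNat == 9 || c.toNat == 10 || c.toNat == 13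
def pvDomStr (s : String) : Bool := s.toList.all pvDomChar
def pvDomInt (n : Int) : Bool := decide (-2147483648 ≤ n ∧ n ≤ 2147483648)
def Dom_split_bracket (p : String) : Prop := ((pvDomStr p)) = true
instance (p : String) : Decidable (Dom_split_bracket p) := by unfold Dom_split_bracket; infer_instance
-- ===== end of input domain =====

-- B replaces A's streaming open/close counters with brute-force testing of each candidate even prefix length (recounting '(' per prefix from scratch); alternative decomposition, A O(n) vs B O(n^2).
-- Pre_ excludes inputs with no balanced nonempty prefix: there Python A falls off the loop and returns None, not an int (B likewise).


-- ===== PORT A =====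
-- A's loop: two counters, return open+close at the first equality; fall-through (Python None) is 0, excluded by Pre_.
def splitBracketLoopA : List Char → Int → Int → Int
  | [], _, _ => 0
  | c :: rest, o, cl =>
    let o' := if c = '(' then o + 1 else o
    let cl' := if c = '(' then cl else cl + 1
    if o' = cl' then o' + cl' else splitBracketLoopA rest o' cl'

def split_bracket (p : String) : Int := splitBracketLoopA p.toList 0 0

-- ===== PORT B =====
-- B's loop over range(1, len(p)//2 + 1): test the prefix p[:2k] by recounting '(' from scratch; fall-through is 0 (Pre_).
-- p[:2*k].count('(') is ported as List.count '(' on the sliced char list — exact, since '(' is a single character.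
def splitBracketLoopB (l : List Char) : List Int → Int
  | [] => 0
  | k :: rest =>
    if ((PySem.List.slice l none (some (2 * k))).count '(' : Int) = k then 2 * k
    else splitBracketLoopB l rest

def split_bracket_alt (p : String) : Int :=
  splitBracketLoopB p.toList
    (PySem.List.pyRange 1 (PySem.Int.floordiv (p.toList.length : Int) 2 + 1) 1)

-- ===== PRECONDITION & SPEC =====
-- Pre_ excludes exactly the inputs with no balanced nonempty prefix, on which Python A falls off the loop and returns None (no int).
def Pre_split_bracket (p : String) : Prop :=
  ∃ n ∈ List.range (p.toList.length + 1), 0 < n ∧ 2 * ((p.toList.take n).count '(') = n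
instance (p : String) : Decidable (Pre_split_bracket p) := by unfold Pre_split_bracket; infer_instance
def pvWitness_split_bracket : String := "()"

def Spec_split_bracket (p : String) (out : Int) : Prop := out = split_bracket_alt p
instance (p : String) (out : Int) : Decidable (Spec_split_bracket p out) := by unfold Spec_split_bracket; infer_instance

-- ===== CLAIM (what is proved, stated in full; the proofs are below) =====
def Claim_equal_split_bracket : Prop := ∀ (p : String), Dom_split_bracket p → Pre_split_bracket p → Spec_split_bracket p (split_bracket p)

-- ===== LEMMAS AND PROOFS =====

-- net balance of a prefix: 2 * (# of '(') - length
def pvBal (t : List Char) : Int := 2 * (t.count '(') - t.length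

-- 1-based index of the first position where the running balance (started at b) hits 0
def pvFz : List Char → Int → Option Nat
  | [], _ => none
  | c :: t, b =>
    if b + (if c = '(' then (1 : Int) else -1) = 0 then some 1
    else (pvFz t (b + (if c = '(' then (1 : Int) else -1))).map (· + 1)

theorem pvBal_cons (c : Char) (t : List Char) (i : Nat) :
    pvBal ((c :: t).take (i + 1)) = (if c = '(' then (1 : Int) else -1) + pvBal (t.take i) := by
  by_cases hc : c = '(' <;> simp [pvBal, hc] <;> ring

theorem pvBal_one (c : Char) (t : List Char) :
    pvBal ((c :: t).take 1) = (if c = '(' then (1 : Int) else -1) := by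
  have h := pvBal_cons c t 0
  simpa [pvBal] using h

-- A's loop equals "o+cl+j for the first j where the balance started at o-cl hits 0, else 0"
theorem loopA_eq_fz (l : List Char) (o cl : Int) :
    splitBracketLoopA l o cl =
      (match pvFz l (o - cl) with
       | some j => o + cl + (j : Int)
       | none => 0) := by
  induction l generalizing o cl with
  | nil => simp [splitBracketLoopA, pvFz]
  | cons c t ih =>
    simp only [splitBracketLoopA, pvFz]
    by_cases hc : c = '('
    · simp only [hc, if_true]
      by_cases hz : o + 1 = cl
      · have h0 : o - cl + (1 : Int) = 0 := by omega
        rw [if_pos hz, if_pos h0]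
        show o + 1 + cl = o + cl + ((1:Nat):Int)
        push_cast
        linarith
      · have hb : o - cl + (1 : Int) ≠ 0 := by omega
        rw [if_neg hz, if_neg hb, ih]
        have he : o + 1 - cl = o - cl + 1 := by omega
        rw [he]
        cases pvFz t (o - cl + 1) with
        | none => simp
        | some j => simp only [Option.map_some]; push_cast; linarith
    · simp only [hc, if_false]
      by_cases hz : o = cl + 1
      · have h0 : o - cl + (-1 : Int) = 0 := by omega
        rw [if_pos hz, if_pos h0]
        show o + (cl + 1) = o + cl + ((1:Nat):Int)
        push_cast
        linarith
      · have hb : o - cl + (-1 : Int) ≠ 0 := by omega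
        rw [if_neg hz, if_neg hb, ih]
        have he : o - (cl + 1) = o - cl + -1 := by omega
        rw [he]
        cases pvFz t (o - cl + -1) with
        | none => simp
        | some j => simp only [Option.map_some]; push_cast; linarith

theorem pvFz_some (l : List Char) (b : Int) (j : Nat) (h : pvFz l b = some j) :
    1 ≤ j ∧ j ≤ l.length ∧ b + pvBal (l.take j) = 0 ∧
      ∀ i, 1 ≤ i → i < j → b + pvBal (l.take i) ≠ 0 := by
  induction l generalizing b j with
  | nil => simp [pvFz] at h
  | cons c t ih =>
    rw [pvFz] at h
    by_cases h0 : b + (if c = '(' then (1 : Int) else -1) = 0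
    · rw [if_pos h0] at h
      injection h with h
      subst h
      exact ⟨le_rfl, by simp, by rw [pvBal_one]; omega, fun i h1 h2 => absurd (lt_of_le_of_lt h1 h2) (by omega)⟩
    · rw [if_neg h0] at h
      cases hfz : pvFz t (b + (if c = '(' then (1 : Int) else -1)) with
      | none => rw [hfz] at h; simp at h
      | some j' =>
        rw [hfz] at h
        simp only [Option.map_some, Option.some.injEq] at h
        subst h
        obtain ⟨h1, h2, h3, h4⟩ := ih _ j' hfz
        refine ⟨by omega, by simpa using h2, ?_, ?_⟩
        · rw [pvBal_cons]; omega
        · intro i hi1 hi2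
          match i, hi1 with
          | 1, _ =>
            rw [pvBal_one]; omega
          | (i' + 2), _ =>
            rw [show i' + 2 = (i' + 1) + 1 from rfl, pvBal_cons]
            have := h4 (i' + 1) (by omega) (by omega)
            omega

theorem pvFz_none (l : List Char) (b : Int) (h : pvFz l b = none) :
    ∀ i, 1 ≤ i → i ≤ l.length → b + pvBal (l.take i) ≠ 0 := by
  induction l generalizing b with
  | nil => intro i h1 h2; simp at h2; omega
  | cons c t ih =>
    rw [pvFz] at h
    by_cases h0 : b + (if c = '(' then (1 : Int) else -1) = 0
    · rw [if_pos h0] at h; simp at h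
    · rw [if_neg h0] at h
      have hfz : pvFz t (b + (if c = '(' then (1 : Int) else -1)) = none := by
        cases hfz : pvFz t (b + (if c = '(' then (1 : Int) else -1)) with
        | none => rfl
        | some j' => rw [hfz] at h; simp at h
      intro i hi1 hi2
      match i, hi1 with
      | 1, _ =>
        rw [pvBal_one]; omega
      | (i' + 2), _ =>
        rw [show i' + 2 = (i' + 1) + 1 from rfl, pvBal_cons]
        have := ih _ hfz (i' + 1) (by omega) (by simpa using Nat.le_of_succ_le_succ hi2)
        omega

-- B's loop returns 2*k0 when k0 is the first candidate in [a, m) passing the count test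
theorem loopB_first (l : List Char) (m k0 : Int) (h2 : k0 < m)
    (hP : ((PySem.List.slice l none (some (2 * k0))).count '(' : Int) = k0) :
    ∀ (n : Nat) (a : Int), (k0 - a).toNat = n → a ≤ k0 →
      (∀ k, a ≤ k → k < k0 → ((PySem.List.slice l none (some (2 * k))).count '(' : Int) ≠ k) →
      splitBracketLoopB l (PySem.List.pyRange a m 1) = 2 * k0 := by
  intro n
  induction n with
  | zero =>
    intro a hn ha _
    have : a = k0 := by omega
    subst this
    rw [PySem.List.pyRange_one_cons (by omega)]
    simp only [splitBracketLoopB]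
    rw [if_pos hP]
  | succ n ih =>
    intro a hn ha hmin
    rw [PySem.List.pyRange_one_cons (by omega)]
    simp only [splitBracketLoopB]
    rw [if_neg (hmin a le_rfl (by omega))]
    exact ih (a + 1) (by omega) (by omega) (fun k hk1 hk2 => hmin k (by omega) hk2)

-- B's loop returns 0 when no candidate in [a, m) passes the count test
theorem loopB_none (l : List Char) :
    ∀ (n : Nat) (a m : Int), (m - a).toNat = n →
      (∀ k, a ≤ k → k < m → ((PySem.List.slice l none (some (2 * k))).count '(' : Int) ≠ k) →
      splitBracketLoopB l (PySem.List.pyRange a m 1) = 0 := by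
  intro n
  induction n with
  | zero =>
    intro a m hn _
    rw [PySem.List.pyRange_one_eq_nil (by omega)]
    rfl
  | succ n ih =>
    intro a m hn hmin
    rw [PySem.List.pyRange_one_cons (by omega)]
    simp only [splitBracketLoopB]
    rw [if_neg (hmin a le_rfl (by omega))]
    exact ih (a + 1) m (by omega) (fun k hk1 hk2 => hmin k (by omega) hk2)

-- B's count test at candidate k, in terms of pvBal
theorem slice_cond_iff (l : List Char) (k : Nat) (hk : 2 * k ≤ l.length) :
    (((PySem.List.slice l none (some (2 * (k : Int)))).count '(' : Int) = (k : Int)) ↔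
      pvBal (l.take (2 * k)) = 0 := by
  have hs : PySem.List.slice l none (some (2 * (k : Int))) = l.take (2 * k) := by
    rw [show (2 * (k : Int)) = ((2 * k : Nat) : Int) by push_cast; ring]
    exact PySem.List.slice_to_natCast l (2 * k)
  rw [hs]
  unfold pvBal
  rw [List.length_take, min_eq_left hk]
  constructor <;> intro h <;> push_cast at h ⊢ <;> omega

-- the balance of the length-i prefix has the parity of i (for i within the list)
theorem pvBal_parity (l : List Char) (i : Nat) (hi : i ≤ l.length) :
    (pvBal (l.take i)) % 2 = (i : Int) % 2 := by
  unfold pvBal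
  rw [List.length_take, min_eq_left hi]
  have : (l.take i).count '(' ≤ i := by
    calc (l.take i).count '(' ≤ (l.take i).length := List.count_le_length
    _ ≤ i := by rw [List.length_take, min_eq_left hi]
  omega

theorem ports_agree (p : String) : split_bracket p = split_bracket_alt p := by
  unfold split_bracket split_bracket_alt
  set l := p.toList with hl
  have hfd : PySem.Int.floordiv (l.length : Int) 2 = ((l.length / 2 : Nat) : Int) := by
    exact_mod_cast PySem.Int.floordiv_natCast l.length 2
  have h00 : (0 : Int) - 0 = 0 := by norm_num
  rw [loopA_eq_fz, hfd, h00]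
  cases hfz : pvFz l 0 with
  | none =>
    have hno := pvFz_none l 0 hfz
    have hcond : ∀ k, (1:Int) ≤ k → k < ((l.length / 2 : Nat) : Int) + 1 →
        ((PySem.List.slice l none (some (2 * k))).count '(' : Int) ≠ k := by
      intro k hk1 hk2
      lift k to Nat using (by omega)
      have hkn : k ≤ l.length / 2 := by exact_mod_cast (by omega : (k : Int) ≤ ((l.length / 2 : Nat) : Int))
      have hkl : 2 * k ≤ l.length := by omega
      rw [Ne, slice_cond_iff l k hkl]
      have := hno (2 * k) (by omega) hkl
      omega
    rw [loopB_none l ((((l.length / 2 : Nat) : Int) + 1) - 1).toNat 1 (((l.length / 2 : Nat) : Int) + 1) rfl hcond]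
  | some j =>
    obtain ⟨hj1, hj2, hj3, hj4⟩ := pvFz_some l 0 j hfz
    have hpar := pvBal_parity l j hj2
    have hje : j % 2 = 0 := by omega
    obtain ⟨k0, hk0⟩ : ∃ k0, j = 2 * k0 := ⟨j / 2, by omega⟩
    have hk0m : (k0 : Int) < ((l.length / 2 : Nat) : Int) + 1 := by
      have : k0 ≤ l.length / 2 := by omega
      have h' : (k0 : Int) ≤ ((l.length / 2 : Nat) : Int) := by exact_mod_cast this
      omega
    have hP : ((PySem.List.slice l none (some (2 * (k0 : Int)))).count '(' : Int) = (k0 : Int) := by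
      rw [slice_cond_iff l k0 (by omega), ← hk0]
      simpa using hj3
    have hmin : ∀ k, (1:Int) ≤ k → k < (k0 : Int) →
        ((PySem.List.slice l none (some (2 * k))).count '(' : Int) ≠ k := by
      intro k hk1 hk2
      lift k to Nat using (by omega)
      have hkn : k < k0 := by exact_mod_cast hk2
      have hkl : 2 * k ≤ l.length := by omega
      rw [Ne, slice_cond_iff l k hkl]
      have := hj4 (2 * k) (by omega) (by omega)
      omega
    rw [loopB_first l (((l.length / 2 : Nat) : Int) + 1) (k0 : Int) hk0m hP ((k0 : Int) - 1).toNat 1 rfl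
      (by omega) hmin]
    have hjn : j = k0 + k0 := by omega
    have hjk : (j : Int) = (k0 : Int) + (k0 : Int) := by exact_mod_cast hjn
    linarith [hjk]

-- ===== VERDICT (by name: the statement is the Claim_ definition above) =====
theorem split_bracket_spec : Claim_equal_split_bracket := by
  intro p _ _
  unfold Spec_split_bracket
  exact ports_agree p
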